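-- pv_equiv track=rewrite | github.com/a3yu/causal_inference | model/graphs/graphs.py | _isDisjoint
-- ===== SOURCE A (Python) =====
-- def _isDisjoint(partition) -> bool:
--         distinct = set()
--         counter = 0
--         for part in partition:
--             for v in part:
--                 distinct.add(v)
--                 counter += 1
--         return len(distinct) == counter
-- ===== SOURCE B (Python) =====
-- def _isDisjoint(partition) -> bool:
--     flat = sorted(v for part in partition for v in part)
--     return all(a != b for a, b in zip(flat, flat[1:]))
-- ===== Notes on version B (the rewrite author's own statement) =====
-- stated objective: alternative
-- what changed: Replaces A's hash-set-plus-counter tally (size comparison at the end) by a sort-based duplicate check: flatten all parts, sort the values, and test that no two adjacent elements of the sorted list are equal.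
import Mathlib
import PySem

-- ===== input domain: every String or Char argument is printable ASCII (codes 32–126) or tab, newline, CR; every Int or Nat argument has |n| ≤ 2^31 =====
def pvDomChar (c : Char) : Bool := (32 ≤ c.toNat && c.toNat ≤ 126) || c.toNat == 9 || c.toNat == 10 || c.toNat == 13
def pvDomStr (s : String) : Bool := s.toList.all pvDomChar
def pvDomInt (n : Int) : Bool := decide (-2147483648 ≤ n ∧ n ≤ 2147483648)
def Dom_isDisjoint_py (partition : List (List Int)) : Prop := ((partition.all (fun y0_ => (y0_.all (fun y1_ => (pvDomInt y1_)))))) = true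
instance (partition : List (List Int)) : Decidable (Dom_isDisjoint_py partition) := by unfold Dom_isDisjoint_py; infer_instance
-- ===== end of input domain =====

-- B replaces A's set-plus-counter tally by sort-then-adjacent-scan; objective: alternative algorithm.

-- ===== PORT A =====
-- literal port of A: build the set of all values while counting every element, then compare sizes
def isDisjoint_py (partition : List (List Int)) : Bool :=
  let st := partition.foldl
    (fun st part => part.foldl
      (fun (st : PySem.Set Int × Int) v => (PySem.Set.add st.1 v, st.2 + 1)) st)
    (PySem.Set.empty, (0 : Int))
  PySem.Set.len st.1 == st.2

-- ===== PORT B =====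
-- port of B: flatten, sort, check no equal adjacent pair (all over zip(flat, flat[1:]))
def isDisjoint_py_alt (partition : List (List Int)) : Bool :=
  let flat := PySem.List.sorted (partition.flatMap (fun part => part)) (fun x => x) false
  (flat.zip (PySem.List.slice flat (some 1) none)).all (fun p => p.1 != p.2)

-- ===== PRECONDITION & SPEC =====
def Spec_isDisjoint_py (partition : List (List Int)) (out : Bool) : Prop := out = isDisjoint_py_alt partition
instance (partition : List (List Int)) (out : Bool) : Decidable (Spec_isDisjoint_py partition out) := by unfold Spec_isDisjoint_py; infer_instance

-- ===== CLAIM (what is proved, stated in full; the proofs are below) =====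
def Claim_equal_isDisjoint_py : Prop := ∀ (partition : List (List Int)), Dom_isDisjoint_py partition → Spec_isDisjoint_py partition (isDisjoint_py partition)

-- ===== LEMMAS AND PROOFS =====

-- A's inner fold: the counter component just adds the part's length
theorem foldA_snd (xs : List Int) (s : PySem.Set Int) (c : Int) :
    xs.foldl (fun (st : PySem.Set Int × Int) v => (PySem.Set.add st.1 v, st.2 + 1)) (s, c)
      = (xs.foldl PySem.Set.add s, c + xs.length) := by
  induction xs generalizing s c with
  | nil => simp
  | cons v vs ih =>
    rw [List.foldl_cons, ih, List.foldl_cons, List.length_cons]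
    have h1 : c + 1 + (vs.length : Int) = c + ((vs.length + 1 : Nat) : Int) := by
      push_cast; ring
    rw [h1]

-- the set can grow by at most one element per add
theorem length_foldl_add_le (xs : List Int) (s : PySem.Set Int) :
    (xs.foldl PySem.Set.add s).length ≤ s.length + xs.length := by
  induction xs generalizing s with
  | nil => simp
  | cons v vs ih =>
    have h1 : (PySem.Set.add s v).length ≤ s.length + 1 := by
      by_cases hv : v ∈ s
      · simp [PySem.Set.add_of_mem hv]
      · simp [PySem.Set.add_of_not_mem hv]
    have := ih (PySem.Set.add s v)
    simp only [List.foldl_cons, List.length_cons]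
    omega

-- A's size test characterised: it is exactly "no duplicates among xs, none already in seen"
theorem a_core (xs : List Int) (seen : PySem.Set Int) (hnd : seen.Nodup) :
    ((((xs.foldl PySem.Set.add seen).length : Int) == (seen.length : Int) + xs.length))
      = decide (xs.Nodup ∧ ∀ v ∈ xs, v ∉ seen) := by
  induction xs generalizing seen with
  | nil => simp
  | cons v vs ih =>
    simp only [List.foldl_cons]
    by_cases hv : v ∈ seen
    · rw [PySem.Set.add_of_mem hv]
      have hle := length_foldl_add_le vs seen
      have hL : ((((vs.foldl PySem.Set.add seen).length : Int) == (seen.length : Int) + (v :: vs).length)) = false := by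
        rw [beq_eq_false_iff_ne]
        intro h
        simp only [List.length_cons] at h
        push_cast at h
        omega
      rw [hL]
      symm
      simp only [decide_eq_false_iff_not]
      rintro ⟨_, h⟩
      exact h v (by simp) hv
    · rw [PySem.Set.add_of_not_mem hv]
      have hnd' : (seen ++ [v]).Nodup := by
        simp [List.nodup_append, hnd]
        intro a ha h
        exact hv (h ▸ ha)
      have harith : ((seen.length : Int) + ((v :: vs).length : Int))
          = (((seen ++ [v]).length : Int) + (vs.length : Int)) := by
        simp; ring
      rw [harith, ih (seen ++ [v]) hnd']
      apply decide_eq_decide.mpr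
      simp only [List.nodup_cons, List.mem_append, List.mem_cons]
      constructor
      · rintro ⟨h1, h2⟩
        refine ⟨⟨fun hin => ?_, h1⟩, fun u hu => ?_⟩
        · have := (h2 v hin)
          simp at this
        · rcases hu with rfl | hu
          · exact hv
          · have := h2 u hu
            tauto
      · rintro ⟨⟨hvvs, h1⟩, h2⟩
        refine ⟨h1, fun u hu => ?_⟩
        have hns := h2 u (Or.inr hu)
        rintro (h | rfl | h)
        · exact hns h
        · exact hvvs hu
        · exact List.not_mem_nil h

-- the nested A-fold is the flat fold (foldl over flatten)
theorem foldA_eq_flat (ps : List (List Int)) (st : PySem.Set Int × Int) :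
    ps.foldl (fun st part => part.foldl
        (fun (st : PySem.Set Int × Int) v => (PySem.Set.add st.1 v, st.2 + 1)) st) st
      = ps.flatten.foldl (fun (st : PySem.Set Int × Int) v => (PySem.Set.add st.1 v, st.2 + 1)) st := by
  induction ps generalizing st with
  | nil => simp
  | cons p ps ih => simp [List.foldl_append, ih]

-- B's adjacent scan is the Chain' (≠) predicate
theorem zip_all_ne (ys : List Int) :
    (ys.zip ys.tail).all (fun p => p.1 != p.2) = decide (List.IsChain (· ≠ ·) ys) := by
  induction ys with
  | nil => simp
  | cons a ys ih =>
    cases ys with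
    | nil => simp
    | cons b ys =>
      simp only [List.tail_cons, List.zip_cons_cons, List.all_cons, List.isChain_cons_cons]
      rw [show (b :: ys).tail = ys from rfl] at ih
      rw [ih]
      by_cases h : a = b <;> simp [h]

-- on a ≤-sorted list, "no equal adjacent pair" is exactly Nodup
theorem chain'_ne_iff_nodup (ys : List Int) (hs : ys.Pairwise (· ≤ ·)) :
    List.IsChain (· ≠ ·) ys ↔ ys.Nodup := by
  constructor
  · intro hc
    have hlt : List.IsChain (· < ·) ys := by
      have hs' : List.IsChain (· ≤ ·) ys := hs.isChain
      clear hs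
      induction ys with
      | nil => simp
      | cons a ys ih =>
        cases ys with
        | nil => simp
        | cons b ys =>
          rw [List.isChain_cons_cons] at hc hs' ⊢
          exact ⟨lt_of_le_of_ne hs'.1 hc.1, ih hc.2 hs'.2⟩
    exact hlt.pairwise.nodup
  · intro hnd
    exact (hnd.imp (fun h => h)).isChain

-- ===== VERDICT (by name: the statement is the Claim_ definition above) =====
theorem isDisjoint_py_spec : Claim_equal_isDisjoint_py := by
  intro partition _
  unfold Spec_isDisjoint_py
  simp only [isDisjoint_py, isDisjoint_py_alt]
  rw [foldA_eq_flat, foldA_snd]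
  have hA : (((partition.flatten.foldl PySem.Set.add PySem.Set.empty).length : Int)
        == ((PySem.Set.empty : PySem.Set Int).length : Int) + partition.flatten.length)
      = decide partition.flatten.Nodup := by
    rw [a_core partition.flatten PySem.Set.empty (by simp [PySem.Set.empty])]
    apply decide_eq_decide.mpr
    simp [PySem.Set.empty]
  have hflat : partition.flatMap (fun part => part) = partition.flatten := by
    simp [List.flatMap_def]
  rw [hflat]
  set flat := PySem.List.sorted partition.flatten (fun x => x) false with hf
  rw [PySem.List.slice_from_one, zip_all_ne]
  have hperm : flat.Perm partition.flatten := PySem.List.sorted_perm _ _ _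
  have hpw : flat.Pairwise (fun a b => a ≤ b) := PySem.List.sorted_pairwise _ _
  have hB : decide (List.IsChain (· ≠ ·) flat) = decide partition.flatten.Nodup := by
    apply decide_eq_decide.mpr
    rw [chain'_ne_iff_nodup flat hpw]
    exact hperm.nodup_iff
  rw [hB]
  simp only [PySem.Set.len, PySem.Set.empty, List.length_nil, Int.natCast_zero] at hA ⊢
  simpa using hA
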